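-- pv_equiv track=rewrite | github.com/jasongullifer/Keystroking-Processor | keystroking_to_video.py | filter_events_remove_backspace_edits
-- ===== SOURCE A (Python) =====
-- def _xml_output_is_stackable(o):
--     """Keyboard outputs that change text in XML mode (SPACE or single character)."""
--     if o is None:
--         return False
--     if o == "SPACE":
--         return True
--     return isinstance(o, str) and len(o) == 1
--
-- def _data_event_is_stackable(event):
--     """Events that change text in data.txt / IDFX mode (same rules as reconstruct)."""
--     o = event.get("output")
--     if not isinstance(o, str):
--         return False
--     if o.lower() == "backspace":
--         return False
--     if o in ("space", "enter"):
--         return True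
--     return len(o) == 1
--
-- def filter_events_remove_backspace_edits(events, event_format="data"):
--     """
--     Remove backspace key events and any typing events that were undone by backspace,
--     so the video only shows the surviving text (e.g. type 's', backspace, type 'a' -> only 'a').
--     Non-stackable pass-through events (e.g. odd XML keys) are kept in order.
--     event_format: 'xml' (SPACE, BACK, single char) or 'data' (space, enter, backspace, single char).
--     """
--     if not events:
--         return []
--     result = []
--     stack = []
--     for event in events:
--         o = event.get("output")
--         if event_format == "xml":
--             if o == "BACK":
--                 if stack:
--                     stack.pop()
--                     for i in range(len(result) - 1, -1, -1):
--                         if _xml_output_is_stackable(result[i].get("output")):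
--                             del result[i]
--                             break
--                 continue
--             if _xml_output_is_stackable(o):
--                 stack.append(event)
--             result.append(event)
--         else:
--             if isinstance(o, str) and o.lower() == "backspace":
--                 if stack:
--                     stack.pop()
--                     for i in range(len(result) - 1, -1, -1):
--                         if _data_event_is_stackable(result[i]):
--                             del result[i]
--                             break
--                 continue
--             if _data_event_is_stackable(event):
--                 stack.append(event)
--             result.append(event)
--     return result
-- ===== SOURCE B (Python) =====
-- def _xml_output_is_stackable(o):
--     if o is None:
--         return False
--     if o == "SPACE":
--         return True
--     return isinstance(o, str) and len(o) == 1
--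
-- def _data_event_is_stackable(event):
--     o = event.get("output")
--     if not isinstance(o, str):
--         return False
--     if o.lower() == "backspace":
--         return False
--     if o in ("space", "enter"):
--         return True
--     return len(o) == 1
--
-- def filter_events_remove_backspace_edits(events, event_format="data"):
--     """One reverse pass: count pending backspaces; each backspace cancels the
--     nearest earlier text-changing event; everything else passes through."""
--     if event_format == "xml":
--         def is_back(e):
--             return e.get("output") == "BACK"
--         def is_text(e):
--             return _xml_output_is_stackable(e.get("output"))
--     else:
--         def is_back(e):
--             o = e.get("output")
--             return isinstance(o, str) and o.lower() == "backspace"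
--         def is_text(e):
--             return _data_event_is_stackable(e)
--     out = []
--     pending = 0
--     for e in reversed(events):
--         if is_back(e):
--             pending += 1
--         elif is_text(e):
--             if pending:
--                 pending -= 1
--             else:
--                 out.append(e)
--         else:
--             out.append(e)
--     out.reverse()
--     return out
-- ===== Notes on version B (the rewrite author's own statement) =====
-- stated objective: alternative
-- what changed: A keeps a parallel stack of typed events and, for every backspace, rescans the accumulated result list from the end and deletes the last text-changing entry in place; B does a single reverse pass that counts pending backspaces, cancelling the nearest earlier text-changing event per pending backspace, and reverses once at the end.
import Mathlib
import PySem

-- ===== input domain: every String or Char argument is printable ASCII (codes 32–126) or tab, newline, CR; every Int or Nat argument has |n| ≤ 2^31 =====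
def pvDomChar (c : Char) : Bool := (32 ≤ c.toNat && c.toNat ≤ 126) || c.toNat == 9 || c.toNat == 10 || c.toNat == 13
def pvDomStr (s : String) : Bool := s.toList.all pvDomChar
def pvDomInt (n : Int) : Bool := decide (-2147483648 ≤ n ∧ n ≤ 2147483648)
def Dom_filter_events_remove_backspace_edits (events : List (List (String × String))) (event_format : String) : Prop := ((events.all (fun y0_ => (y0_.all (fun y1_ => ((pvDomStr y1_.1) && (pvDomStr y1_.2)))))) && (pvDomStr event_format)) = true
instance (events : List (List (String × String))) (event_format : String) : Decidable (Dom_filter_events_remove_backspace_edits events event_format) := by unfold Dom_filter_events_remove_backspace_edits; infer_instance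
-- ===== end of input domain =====

-- B replaces A's forward loop with a parallel stack and per-backspace rescan-and-delete of
-- `result` by a single reverse pass counting pending backspaces; same return value.

-- ===== PORT A =====
-- shared module helper: event.get("output") on the association-list dict (first match)
def pvGetOutput (ev : List (String × String)) : Option String :=
  match ev with
  | [] => none
  | (k, v) :: rest => if k == "output" then some v else pvGetOutput rest

-- _xml_output_is_stackable
def pvXmlOutputIsStackable (o : Option String) : Bool :=
  match o with
  | none => false
  | some s => if s == "SPACE" then true else PySem.Str.len s == 1

-- _data_event_is_stackable
def pvDataEventIsStackable (ev : List (String × String)) : Bool :=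
  match pvGetOutput ev with
  | none => false
  | some o =>
    if PySem.Str.lower o == "backspace" then false
    else if o == "space" || o == "enter" then true
    else PySem.Str.len o == 1

-- A's inner loop: for i in range(len(result)-1, -1, -1): if stackable(result[i]): del result[i]; break
def pvDelScan (p : List (String × String) → Bool)
    (result : List (List (String × String))) : List Int → List (List (String × String))
  | [] => result
  | i :: rest =>
    match PySem.List.pyGet? result i with
    | none => result
    | some ev =>
      if p ev then
        match PySem.List.pop? result i with
        | some pr => pr.2
        | none => result
      else pvDelScan p result rest

-- A's main loop over events, carrying (result, stack)
def pvLoopA (event_format : String) (result stack : List (List (String × String))) :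
    List (List (String × String)) → List (List (String × String))
  | [] => result
  | event :: rest =>
    let o := pvGetOutput event
    if event_format == "xml" then
      if o == some "BACK" then
        if stack.isEmpty then pvLoopA event_format result stack rest
        else pvLoopA event_format
          (pvDelScan (fun ev => pvXmlOutputIsStackable (pvGetOutput ev)) result
            (PySem.List.pyRange (PySem.List.len result - 1) (-1) (-1)))
          stack.dropLast rest
      else
        pvLoopA event_format (result ++ [event])
          (if pvXmlOutputIsStackable o then stack ++ [event] else stack) rest
    else
      if (match o with | some s => PySem.Str.lower s == "backspace" | none => false) then
        if stack.isEmpty then pvLoopA event_format result stack rest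
        else pvLoopA event_format
          (pvDelScan pvDataEventIsStackable result
            (PySem.List.pyRange (PySem.List.len result - 1) (-1) (-1)))
          stack.dropLast rest
      else
        pvLoopA event_format (result ++ [event])
          (if pvDataEventIsStackable event then stack ++ [event] else stack) rest

def filter_events_remove_backspace_edits (events : List (List (String × String))) (event_format : String) : List (List (String × String)) :=
  match events with
  | [] => []
  | _ => pvLoopA event_format [] [] events

-- ===== PORT B =====
-- B's is_back / is_text, chosen once from event_format
def pvIsBackB (event_format : String) : List (String × String) → Bool :=
  if event_format == "xml" then fun e => pvGetOutput e == some "BACK"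
  else fun e =>
    match pvGetOutput e with
    | some o => PySem.Str.lower o == "backspace"
    | none => false

def pvIsTextB (event_format : String) : List (String × String) → Bool :=
  if event_format == "xml" then fun e => pvXmlOutputIsStackable (pvGetOutput e)
  else fun e => pvDataEventIsStackable e

def filter_events_remove_backspace_edits_alt (events : List (List (String × String))) (event_format : String) : List (List (String × String)) :=
  let isBack := pvIsBackB event_format
  let isText := pvIsTextB event_format
  let st := events.reverse.foldl
    (fun (s : List (List (String × String)) × Int) e =>
      if isBack e then (s.1, s.2 + 1)
      else if isText e then (if s.2 ≠ 0 then (s.1, s.2 - 1) else (s.1 ++ [e], s.2))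
      else (s.1 ++ [e], s.2)) ([], 0)
  st.1.reverse

-- ===== PRECONDITION & SPEC =====
def Spec_filter_events_remove_backspace_edits (events : List (List (String × String))) (event_format : String) (out : List (List (String × String))) : Prop := out = filter_events_remove_backspace_edits_alt events event_format
instance (events : List (List (String × String))) (event_format : String) (out : List (List (String × String))) : Decidable (Spec_filter_events_remove_backspace_edits events event_format out) := by unfold Spec_filter_events_remove_backspace_edits; infer_instance

-- ===== CLAIM (what is proved, stated in full; the proofs are below) =====
def Claim_equal_filter_events_remove_backspace_edits : Prop := ∀ (events : List (List (String × String))) (event_format : String), Dom_filter_events_remove_backspace_edits events event_format → Spec_filter_events_remove_backspace_edits events event_format (filter_events_remove_backspace_edits events event_format)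

-- ===== LEMMAS AND PROOFS =====

-- remove the first element satisfying p (identity if none)
def eraseFirstP {α : Type} (p : α → Bool) : List α → List α
  | [] => []
  | x :: xs => if p x then xs else x :: eraseFirstP p xs

-- remove the LAST element satisfying p (identity if none): what A's backspace does to result
def eraseLastP {α : Type} (p : α → Bool) (l : List α) : List α :=
  (eraseFirstP p l.reverse).reverse

theorem eraseFirstP_of_countP_zero {α : Type} (p : α → Bool) :
    ∀ l : List α, l.countP p = 0 → eraseFirstP p l = l := by
  intro l h
  induction l with
  | nil => rfl
  | cons x xs ih =>
    rw [List.countP_cons] at h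
    cases hpx : p x with
    | true => rw [hpx] at h; simp at h
    | false =>
      rw [hpx] at h
      simp only [if_false, Bool.false_eq_true, Nat.add_zero] at h
      simp [eraseFirstP, hpx, ih h]

theorem countP_eraseFirstP {α : Type} (p : α → Bool) :
    ∀ l : List α, 0 < l.countP p → (eraseFirstP p l).countP p + 1 = l.countP p := by
  intro l h
  induction l with
  | nil => simp at h
  | cons x xs ih =>
    cases hx : p x with
    | true => simp [eraseFirstP, hx]
    | false =>
      rw [List.countP_cons] at h
      have hxs : 0 < xs.countP p := by simpa [hx] using h
      simp [eraseFirstP, hx, ih hxs]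

theorem eraseLastP_of_countP_zero {α : Type} (p : α → Bool) (l : List α)
    (h : l.countP p = 0) : eraseLastP p l = l := by
  unfold eraseLastP
  rw [eraseFirstP_of_countP_zero p l.reverse (by simpa using h), List.reverse_reverse]

theorem countP_eraseLastP {α : Type} (p : α → Bool) (l : List α)
    (h : 0 < l.countP p) : (eraseLastP p l).countP p + 1 = l.countP p := by
  unfold eraseLastP
  rw [List.countP_reverse]
  rw [← List.countP_reverse (l := l)]
  exact countP_eraseFirstP p l.reverse (by simpa using h)

theorem eraseLastP_append_sat {α : Type} (p : α → Bool) (r : List α) (e : α)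
    (h : p e = true) : eraseLastP p (r ++ [e]) = r := by
  simp [eraseLastP, eraseFirstP, h]

theorem eraseLastP_append_not {α : Type} (p : α → Bool) (r : List α) (e : α)
    (h : p e = false) : eraseLastP p (r ++ [e]) = eraseLastP p r ++ [e] := by
  simp [eraseLastP, eraseFirstP, h]

theorem iter_eraseLastP_nil {α : Type} (p : α → Bool) :
    ∀ n : Nat, (eraseLastP p)^[n] ([] : List α) = [] := by
  intro n
  induction n with
  | zero => rfl
  | succ m ih => rw [Function.iterate_succ_apply, eraseLastP_of_countP_zero p [] (by simp), ih]

theorem iter_eraseLastP_append_not {α : Type} (p : α → Bool) (e : α) (h : p e = false) :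
    ∀ (n : Nat) (r : List α), (eraseLastP p)^[n] (r ++ [e]) = (eraseLastP p)^[n] r ++ [e] := by
  intro n
  induction n with
  | zero => intro r; rfl
  | succ m ih =>
    intro r
    rw [Function.iterate_succ_apply, Function.iterate_succ_apply,
      eraseLastP_append_not p r e h, ih]

-- A's reverse index scan deletes exactly the last stackable element
theorem pvDelScan_append (p : List (String × String) → Bool) :
    ∀ (rest : List Int) (init : List (List (String × String))) (a : List (String × String)),
      (∀ i ∈ rest, 0 ≤ i ∧ i < (init.length : Int)) →
      pvDelScan p (init ++ [a]) rest = pvDelScan p init rest ++ [a] := by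
  intro rest
  induction rest with
  | nil => intro init a _; rfl
  | cons i rest ih =>
    intro init a hb
    obtain ⟨h0, hlt⟩ := hb i (by simp)
    obtain ⟨n, rfl⟩ : ∃ n : Nat, i = (n : Int) := ⟨i.toNat, (Int.toNat_of_nonneg h0).symm⟩
    have hlen : n < init.length := by exact_mod_cast hlt
    have hget : PySem.List.pyGet? (init ++ [a]) (n : Int) = some init[n] := by
      rw [PySem.List.pyGet?_natCast, List.getElem?_append_left hlen, List.getElem?_eq_getElem hlen]
    have hget' : PySem.List.pyGet? init (n : Int) = some init[n] := by
      rw [PySem.List.pyGet?_natCast, List.getElem?_eq_getElem hlen]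
    simp only [pvDelScan, hget, hget']
    cases hp : p init[n] with
    | true =>
      simp only [if_true]
      rw [PySem.List.pop?_natCast (init ++ [a]) n (by simp [List.length_append]; omega),
        PySem.List.pop?_natCast init n hlen]
      simp [List.eraseIdx_append_of_lt_length hlen]
    | false =>
      simp only [Bool.false_eq_true, reduceIte]
      exact ih init a (fun j hj => hb j (by simp [hj]))

theorem pvDelScan_eq_eraseLastP (p : List (String × String) → Bool)
    (l : List (List (String × String))) :
    pvDelScan p l (PySem.List.pyRange ((l.length : Int) - 1) (-1) (-1)) = eraseLastP p l := by
  induction l using List.reverseRecOn with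
  | nil =>
    rw [PySem.List.pyRange_neg_one_eq_nil (by norm_num)]
    simp [pvDelScan, eraseLastP, eraseFirstP]
  | append_singleton init a ih =>
    have hlen : ((init ++ [a]).length : Int) - 1 = (init.length : Int) := by simp
    rw [hlen, PySem.List.pyRange_neg_one_cons (by omega)]
    have hget : PySem.List.pyGet? (init ++ [a]) ((init.length : Int)) = some a :=
      PySem.List.pyGet?_append_length (pre := init) (y := a) (ys := [])
    simp only [pvDelScan, hget]
    cases hp : p a with
    | true =>
      simp only [if_true]
      rw [PySem.List.pop?_natCast (init ++ [a]) init.length (by simp)]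
      simp [List.eraseIdx_append_of_length_le (le_refl init.length),
        eraseLastP_append_sat p init a hp]
    | false =>
      simp only [Bool.false_eq_true, reduceIte]
      rw [pvDelScan_append p _ init a
        (fun i hi => by
          rw [PySem.List.mem_pyRange_neg_one] at hi
          omega), ih, eraseLastP_append_not p init a hp]

-- A's main loop is a left fold of "backspace => erase last text event, else append",
-- given the invariant |stack| = number of text events in result
theorem pvLoopA_eq_foldl_xml (fmt : String) (hx : (fmt == "xml") = true) :
    ∀ (es r s : List (List (String × String))),
      s.length = r.countP (fun e => pvXmlOutputIsStackable (pvGetOutput e)) →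
      pvLoopA fmt r s es =
        es.foldl (fun r e => if pvGetOutput e == some "BACK" then
          eraseLastP (fun e => pvXmlOutputIsStackable (pvGetOutput e)) r else r ++ [e]) r := by
  intro es
  induction es with
  | nil => intro r s _; rfl
  | cons event es ih =>
    intro r s hinv
    simp only [pvLoopA, List.foldl_cons, hx, reduceIte]
    cases hbe : pvGetOutput event == some "BACK" with
    | true =>
      simp only [reduceIte]
      cases s with
      | nil =>
        have h0 : r.countP (fun e => pvXmlOutputIsStackable (pvGetOutput e)) = 0 := hinv.symm
        rw [eraseLastP_of_countP_zero _ r h0]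
        simp only [List.isEmpty_nil, reduceIte]
        exact ih r [] hinv
      | cons x s' =>
        simp only [List.isEmpty_cons, Bool.false_eq_true, reduceIte]
        rw [PySem.List.len_eq, pvDelScan_eq_eraseLastP]
        apply ih
        have hpos : 0 < r.countP (fun e => pvXmlOutputIsStackable (pvGetOutput e)) := by
          rw [← hinv]; simp
        have hc := countP_eraseLastP (fun e => pvXmlOutputIsStackable (pvGetOutput e)) r hpos
        simp only [List.length_dropLast, List.length_cons] at *
        omega
    | false =>
      simp only [Bool.false_eq_true, reduceIte]
      apply ih
      cases ht : pvXmlOutputIsStackable (pvGetOutput event) with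
      | true =>
        simp only [reduceIte, List.length_append, List.countP_append, List.countP_cons, ht]
        simp [hinv]
      | false =>
        simp only [Bool.false_eq_true, reduceIte, List.countP_append, List.countP_cons, ht]
        simp [hinv]

theorem pvLoopA_eq_foldl_data (fmt : String) (hx : ¬ ((fmt == "xml") = true)) :
    ∀ (es r s : List (List (String × String))),
      s.length = r.countP pvDataEventIsStackable →
      pvLoopA fmt r s es =
        es.foldl (fun r e => if (match pvGetOutput e with
            | some o => PySem.Str.lower o == "backspace"
            | none => false) then
          eraseLastP pvDataEventIsStackable r else r ++ [e]) r := by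
  intro es
  induction es with
  | nil => intro r s _; rfl
  | cons event es ih =>
    intro r s hinv
    simp only [pvLoopA, List.foldl_cons, if_neg hx]
    cases hbe : (match pvGetOutput event with
        | some o => PySem.Str.lower o == "backspace"
        | none => false) with
    | true =>
      simp only [reduceIte]
      cases s with
      | nil =>
        have h0 : r.countP pvDataEventIsStackable = 0 := hinv.symm
        rw [eraseLastP_of_countP_zero _ r h0]
        simp only [List.isEmpty_nil, reduceIte]
        exact ih r [] hinv
      | cons x s' =>
        simp only [List.isEmpty_cons, Bool.false_eq_true, reduceIte]
        rw [PySem.List.len_eq, pvDelScan_eq_eraseLastP]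
        apply ih
        have hpos : 0 < r.countP pvDataEventIsStackable := by rw [← hinv]; simp
        have hc := countP_eraseLastP pvDataEventIsStackable r hpos
        simp only [List.length_dropLast, List.length_cons] at *
        omega
    | false =>
      simp only [Bool.false_eq_true, reduceIte]
      apply ih
      cases ht : pvDataEventIsStackable event with
      | true =>
        simp only [reduceIte, List.length_append, List.countP_append, List.countP_cons, ht]
        simp [hinv]
      | false =>
        simp only [Bool.false_eq_true, reduceIte, List.countP_append, List.countP_cons, ht]
        simp [hinv]

-- the reverse-pass recursion (kept events in order, pending backspace count)
def pvRspec (b p : List (String × String) → Bool) :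
    List (List (String × String)) → List (List (String × String)) × Nat
  | [] => ([], 0)
  | e :: es =>
    let s := pvRspec b p es
    if b e then (s.1, s.2 + 1)
    else if p e then (if s.2 ≠ 0 then (s.1, s.2 - 1) else (e :: s.1, s.2))
    else (e :: s.1, s.2)

theorem foldl_step_eq_pvRspec (b p : List (String × String) → Bool) :
    ∀ (es : List (List (String × String))) (r : List (List (String × String))),
      es.foldl (fun r e => if b e then eraseLastP p r else r ++ [e]) r =
        (eraseLastP p)^[(pvRspec b p es).2] r ++ (pvRspec b p es).1 := by
  intro es
  induction es with
  | nil => intro r; simp [pvRspec]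
  | cons e es ih =>
    intro r
    rw [List.foldl_cons]
    cases hb : b e with
    | true =>
      simp only [pvRspec, hb, if_true]
      rw [ih (eraseLastP p r), ← Function.iterate_succ_apply]
    | false =>
      simp only [pvRspec, hb, Bool.false_eq_true, reduceIte]
      cases hp : p e with
      | true =>
        simp only [reduceIte]
        by_cases hn : (pvRspec b p es).2 ≠ 0
        · rw [if_pos hn, ih (r ++ [e])]
          obtain ⟨m, hm⟩ : ∃ m, (pvRspec b p es).2 = m + 1 :=
            ⟨(pvRspec b p es).2 - 1, by omega⟩
          rw [hm]
          simp only [Nat.add_sub_cancel]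
          rw [Function.iterate_succ_apply, eraseLastP_append_sat p r e hp]
        · rw [if_neg hn]
          rw [not_ne_iff] at hn
          rw [ih (r ++ [e]), hn]
          simp
      | false =>
        simp only [Bool.false_eq_true, reduceIte]
        rw [ih (r ++ [e]), iter_eraseLastP_append_not p e hp]
        simp

theorem foldrB_eq_pvRspec (b p : List (String × String) → Bool) :
    ∀ es : List (List (String × String)),
      es.reverse.foldl
        (fun (s : List (List (String × String)) × Int) e =>
          if b e then (s.1, s.2 + 1)
          else if p e then (if s.2 ≠ 0 then (s.1, s.2 - 1) else (s.1 ++ [e], s.2))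
          else (s.1 ++ [e], s.2)) ([], 0) =
        ((pvRspec b p es).1.reverse, ((pvRspec b p es).2 : Int)) := by
  intro es
  rw [List.foldl_reverse]
  induction es with
  | nil => rfl
  | cons e es ih =>
    rw [List.foldr_cons, ih]
    cases hb : b e with
    | true => simp [pvRspec, hb]
    | false =>
      cases hp : p e with
      | true =>
        simp only [pvRspec, hb, hp, Bool.false_eq_true, reduceIte, if_true]
        by_cases hn : (pvRspec b p es).2 = 0
        · simp [hn]
        · rw [if_pos (by exact_mod_cast hn), if_pos hn]
          simp only [Prod.mk.injEq, true_and]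
          omega
      | false => simp [pvRspec, hb, hp]

theorem alt_eq_pvRspec (events : List (List (String × String))) (event_format : String) :
    filter_events_remove_backspace_edits_alt events event_format =
      (pvRspec (pvIsBackB event_format) (pvIsTextB event_format) events).1 := by
  show (events.reverse.foldl
      (fun (s : List (List (String × String)) × Int) e =>
        if pvIsBackB event_format e then (s.1, s.2 + 1)
        else if pvIsTextB event_format e then (if s.2 ≠ 0 then (s.1, s.2 - 1) else (s.1 ++ [e], s.2))
        else (s.1 ++ [e], s.2)) ([], 0)).1.reverse = _
  rw [foldrB_eq_pvRspec]
  simp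

-- ===== VERDICT (by name: the statement is the Claim_ definition above) =====
theorem filter_events_remove_backspace_edits_spec : Claim_equal_filter_events_remove_backspace_edits := by
  intro events event_format _
  unfold Spec_filter_events_remove_backspace_edits
  rw [alt_eq_pvRspec]
  by_cases hx : (event_format == "xml") = true
  · have hB : pvIsBackB event_format = fun e => pvGetOutput e == some "BACK" := by
      unfold pvIsBackB; exact if_pos hx
    have hT : pvIsTextB event_format = fun e => pvXmlOutputIsStackable (pvGetOutput e) := by
      unfold pvIsTextB; exact if_pos hx
    rw [hB, hT]
    cases events with
    | nil => rfl
    | cons e es =>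
      show pvLoopA event_format [] [] (e :: es) = _
      rw [pvLoopA_eq_foldl_xml event_format hx (e :: es) [] [] (by simp),
        foldl_step_eq_pvRspec, iter_eraseLastP_nil]
      simp
  · have hB : pvIsBackB event_format = fun e =>
        (match pvGetOutput e with
          | some o => PySem.Str.lower o == "backspace"
          | none => false) := by
      unfold pvIsBackB; exact if_neg hx
    have hT : pvIsTextB event_format = fun e => pvDataEventIsStackable e := by
      unfold pvIsTextB; exact if_neg hx
    rw [hB, hT]
    cases events with
    | nil => rfl
    | cons e es =>
      show pvLoopA event_format [] [] (e :: es) = _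
      rw [pvLoopA_eq_foldl_data event_format hx (e :: es) [] [] (by simp),
        foldl_step_eq_pvRspec, iter_eraseLastP_nil]
      simp
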